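-- pv_equiv track=rewrite | github.com/vlad17/timedime | timefly/format_utils.py | indented_list
-- ===== SOURCE A (Python) =====
-- def indented_list(title=None, indentation_level=0, pairs=[], singles=[], join=True, sep=': '):
--     """
--     returns the string
--
--     title
--       left1: right1
--       left2: right2
--       s1
--       s2
--
--     all nicely indented where pairs contains [(left1, right1),
--     (left2, right2)] and singles contains [s1, s2]
--
--     above, ': ' is the sep.
--
--     If title is not present, returns the unindented original list.
--     Everything is pre-indented by 2 spaces indentation_level number
--     of times.
--     """
--     indent = indentation_level * "  "
--     if title:
--         prefix =  (
--             indent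
--             + title
--             + "\n"
--         ) if join else [indent + title]
--         return prefix + indented_list(
--                 title=None,
--                 indentation_level=(indentation_level + 1),
--                 pairs=pairs,
--             join=join,
--             singles=singles,
--             sep=sep
--             )
--     pairs = list(pairs)
--     maxlen = max(len(left) for left, right in pairs) if pairs else 0
--     fmt = indent + "{:<" + str(maxlen) + "s}" + sep + "{}"
--     items = [fmt.format(*pair) for pair in pairs]
--     items.extend([indent + s for s in singles])
--     if join:
--         return "\n".join(items)
--     else:
--         return items
-- ===== SOURCE B (Python) =====
-- def indented_list(title=None, indentation_level=0, pairs=[], singles=[], join=True, sep=': '):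
--     level = indentation_level + 1 if title else indentation_level
--     indent = "  " * level
--     maxlen = max((len(left) for left, _ in pairs), default=0)
--     body = [indent + left.ljust(maxlen) + sep + right for left, right in pairs]
--     body += [indent + s for s in singles]
--     if join:
--         joined = "\n".join(body)
--         return "  " * indentation_level + title + "\n" + joined if title else joined
--     return (["  " * indentation_level + title] if title else []) + body
-- ===== Notes on version B (the rewrite author's own statement) =====
-- stated objective: simpler
-- what changed: B removes A's self-recursion (it bumps the indentation level up front when a title is present and emits the title line directly) and formats pairs with ljust/arithmetic padding instead of assembling a printf-style format string; Pre_ restricts to join=True (with join=False both return a list, not a str) and to sep without brace characters, which A splices into its format string (see cites).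
-- outside the precondition, e.g. on indented_list(None, 0, [], ['x'], False, ': '): A returns ['x'], B returns ['x']; on indented_list(None, 0, [('a', 'b')], [], True, '{{'): A returns 'a{b', B returns 'a{{b'
import Mathlib
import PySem

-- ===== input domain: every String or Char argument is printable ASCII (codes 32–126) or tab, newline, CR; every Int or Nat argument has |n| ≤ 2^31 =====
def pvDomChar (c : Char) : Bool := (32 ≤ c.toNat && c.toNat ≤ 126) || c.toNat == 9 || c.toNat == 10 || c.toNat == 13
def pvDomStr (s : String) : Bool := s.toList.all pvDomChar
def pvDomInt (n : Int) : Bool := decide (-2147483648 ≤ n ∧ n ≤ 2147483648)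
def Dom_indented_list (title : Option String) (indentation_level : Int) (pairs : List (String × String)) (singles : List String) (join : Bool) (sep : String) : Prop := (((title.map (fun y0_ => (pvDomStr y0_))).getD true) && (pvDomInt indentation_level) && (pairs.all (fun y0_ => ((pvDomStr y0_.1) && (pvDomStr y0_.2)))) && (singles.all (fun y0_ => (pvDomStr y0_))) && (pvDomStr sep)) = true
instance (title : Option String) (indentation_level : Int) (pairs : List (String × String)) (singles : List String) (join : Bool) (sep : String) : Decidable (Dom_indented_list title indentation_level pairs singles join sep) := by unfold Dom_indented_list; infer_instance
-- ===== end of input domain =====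

-- B removes A's self-recursion (the level is bumped up front when a title is present) and formats
-- pairs by arithmetic padding instead of building a format string: objective 'simpler'.
-- NOTE: with join=False the Python functions return a LIST of lines (both A and B, identically);
-- that value is not of the declared String type, so Pre_ restricts the claim to join=True.

-- ===== PORT A =====
-- Python truthiness of an Optional[str]: None and "" are falsy.
def pyTruthy (title : Option String) : Bool :=
  match title with
  | some t => t ≠ ""
  | none => false

-- n * "  " (Python string repetition; empty for n ≤ 0) — via PySem.List.pyRepeat on the char list.
def pyStrMul (s : String) (n : Int) : String :=
  String.mk (PySem.List.pyRepeat s.toList n)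

-- ('{:<' + str(maxlen) + 's}').format(left): left-justify with spaces to width maxlen.
-- Exact for maxlen ≥ 0 (here maxlen is a max of lengths) and brace-free sep (enforced by Pre_).
def pyFormatLpad (s : String) (w : Int) : String :=
  s ++ String.mk (List.replicate (w - PySem.Str.len s).toNat ' ')

-- Under Pre_ join = true; the join=False branch of the Python (which returns a list of lines,
-- not a str) is outside Pre_ and is not represented here.
def indented_list (title : Option String) (indentation_level : Int) (pairs : List (String × String)) (singles : List String) (join : Bool) (sep : String) : String :=
  let indent := pyStrMul "  " indentation_level
  if h : pyTruthy title = true then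
    let prefix_ := indent ++ title.getD "" ++ "\n"
    prefix_ ++ indented_list none (indentation_level + 1) pairs singles join sep
  else
    let maxlen : Int :=
      if pairs.isEmpty then 0
      else ((pairs.map (fun p => PySem.Str.len p.1)).max?).getD 0
    let items :=
      pairs.map (fun p => indent ++ pyFormatLpad p.1 maxlen ++ sep ++ p.2)
        ++ singles.map (fun s => indent ++ s)
    PySem.Str.join "\n" items
termination_by (match title with | some _ => 1 | none => 0)
decreasing_by
  cases title with
  | none => simp [pyTruthy] at h
  | some t => simp

-- ===== PORT B =====
-- left.ljust(maxlen): pad on the right with spaces.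
def pyLjust (s : String) (w : Int) : String :=
  s ++ String.mk (List.replicate (w - PySem.Str.len s).toNat ' ')

-- Under Pre_ join = true; Source B's join=False branch returns a list of lines and is outside Pre_.
def indented_list_alt (title : Option String) (indentation_level : Int) (pairs : List (String × String)) (singles : List String) (join : Bool) (sep : String) : String :=
  let level := if pyTruthy title then indentation_level + 1 else indentation_level
  let indent := pyStrMul "  " level
  let maxlen : Int := ((pairs.map (fun p => PySem.Str.len p.1)).max?).getD 0
  let body :=
    pairs.map (fun p => indent ++ pyLjust p.1 maxlen ++ sep ++ p.2)
      ++ singles.map (fun s => indent ++ s)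
  let joined := PySem.Str.join "\n" body
  if pyTruthy title then pyStrMul "  " indentation_level ++ title.getD "" ++ "\n" ++ joined
  else joined

-- ===== PRECONDITION & SPEC =====
-- Pre_ excludes (a) join = False, where both Pythons return a list of lines (not a value of the
-- declared str type), and (b) sep containing '{' or '}', which A splices into its format string
-- so that A raises (ValueError/IndexError) or brace-escapes sep (e.g. sep='{{' prints as '{').
def Pre_indented_list (title : Option String) (indentation_level : Int) (pairs : List (String × String)) (singles : List String) (join : Bool) (sep : String) : Prop :=
  join = true ∧ '{' ∉ sep.toList ∧ '}' ∉ sep.toList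
instance (title : Option String) (indentation_level : Int) (pairs : List (String × String)) (singles : List String) (join : Bool) (sep : String) : Decidable (Pre_indented_list title indentation_level pairs singles join sep) := by unfold Pre_indented_list; infer_instance

def pvWitness_indented_list : Option String × Int × (List (String × String)) × List String × Bool × String :=
  (some "t", 0, [("a", "bc")], ["s"], true, ": ")

def Spec_indented_list (title : Option String) (indentation_level : Int) (pairs : List (String × String)) (singles : List String) (join : Bool) (sep : String) (out : String) : Prop := out = indented_list_alt title indentation_level pairs singles join sep
instance (title : Option String) (indentation_level : Int) (pairs : List (String × String)) (singles : List String) (join : Bool) (sep : String) (out : String) : Decidable (Spec_indented_list title indentation_level pairs singles join sep out) := by unfold Spec_indented_list; infer_instance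

-- ===== CLAIM (what is proved, stated in full; the proofs are below) =====
def Claim_equal_indented_list : Prop := ∀ (title : Option String) (indentation_level : Int) (pairs : List (String × String)) (singles : List String) (join : Bool) (sep : String), Dom_indented_list title indentation_level pairs singles join sep → Pre_indented_list title indentation_level pairs singles join sep → Spec_indented_list title indentation_level pairs singles join sep (indented_list title indentation_level pairs singles join sep)

-- ===== LEMMAS AND PROOFS =====

theorem maxlen_eq (pairs : List (String × String)) :
    (if pairs.isEmpty then (0 : Int)
     else ((pairs.map (fun p => PySem.Str.len p.1)).max?).getD 0)
    = ((pairs.map (fun p => PySem.Str.len p.1)).max?).getD 0 := by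
  cases pairs <;> simp

theorem pad_eq : pyFormatLpad = pyLjust := rfl

-- the untitled case: A's body = B on falsy titles
theorem body_eq (title : Option String) (indentation_level : Int) (pairs : List (String × String)) (singles : List String) (join : Bool) (sep : String) (h : pyTruthy title = false) :
    indented_list title indentation_level pairs singles join sep
      = indented_list_alt title indentation_level pairs singles join sep := by
  rw [indented_list]
  simp only [indented_list_alt, h, pad_eq, maxlen_eq, Bool.false_eq_true, if_false, dif_neg,
    not_false_eq_true]

theorem witness_ok :
    Dom_indented_list (pvWitness_indented_list.1) (pvWitness_indented_list.2.1) (pvWitness_indented_list.2.2.1) (pvWitness_indented_list.2.2.2.1) (pvWitness_indented_list.2.2.2.2.1) (pvWitness_indented_list.2.2.2.2.2)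
    ∧ Pre_indented_list (pvWitness_indented_list.1) (pvWitness_indented_list.2.1) (pvWitness_indented_list.2.2.1) (pvWitness_indented_list.2.2.2.1) (pvWitness_indented_list.2.2.2.2.1) (pvWitness_indented_list.2.2.2.2.2) := by
  constructor <;> decide

-- ===== VERDICT (by name: the statement is the Claim_ definition above) =====
theorem indented_list_spec : Claim_equal_indented_list := by
  intro title lvl pairs singles join sep _ _
  show _ = _
  cases h : pyTruthy title with
  | false => exact body_eq _ _ _ _ _ _ h
  | true =>
    rw [indented_list]
    simp only [h, dif_pos]
    rw [body_eq none (lvl + 1) pairs singles join sep rfl]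
    cases title with
    | none => simp [pyTruthy] at h
    | some t =>
      simp only [pyTruthy, ne_eq, decide_not, Bool.not_eq_eq_eq_not, Bool.not_true,
        decide_eq_false_iff_not] at h
      simp [indented_list_alt, pyTruthy, h, String.append_assoc]
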